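-- pv_equiv track=rewrite | github.com/Vinay1141/coding-practice | prime.py | getCount
-- ===== SOURCE A (Python) =====
-- MOD = 10**9 + 7
--
-- def getCount(N):
--     if N == 1:
--         return 4
--
--     # Initialize the number of ways to configure the first storey
--     previous = [1, 1, 1, 1]  # dp[0]: 1 house, 2 houses, 3 houses, 4 houses
--
--     for i in range(1, N):
--         current = [0] * 4
--
--         # Transition states: dp[i][j] depends on dp[i-1][k] for k in {1, 2, 3, 4}
--         current[0] = (previous[1] + previous[2] + previous[3]) % MOD
--         current[1] = (sum(previous) % MOD)
--         current[2] = (sum(previous) % MOD)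
--         current[3] = (sum(previous) % MOD)
--
--         # Move to the next state
--         previous = current
--
--     # Return the sum of the ways to configure the last storey
--     return sum(previous) % MOD
-- ===== SOURCE B (Python) =====
-- MOD = 10**9 + 7
--
-- def _mat_mul(X, Y):
--     (a, b), (c, d) = X
--     (e, f), (g, h) = Y
--     return (((a * e + b * g) % MOD, (a * f + b * h) % MOD),
--             ((c * e + d * g) % MOD, (c * f + d * h) % MOD))
--
-- def _mat_pow(M, e):
--     R = ((1, 0), (0, 1))
--     while e > 0:
--         if e & 1:
--             R = _mat_mul(R, M)
--         M = _mat_mul(M, M)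
--         e >>= 1
--     return R
--
-- def getCount(N):
--     # sum of the dp row satisfies s(k+2) = 3*(s(k+1)+s(k)), s(0)=4, s(1)=15;
--     # the answer is s(N-1), computed by 2x2 matrix exponentiation.
--     if N <= 1:
--         return 4
--     (a, b), _ = _mat_pow(((3, 3), (1, 0)), N - 2)
--     return (a * 15 + b * 4) % MOD
-- ===== Notes on version B (the rewrite author's own statement) =====
-- stated objective: faster
-- what changed: Replaced A's O(N) four-state DP loop by binary exponentiation of the 2x2 companion matrix of the row-sum recurrence s(k+2)=3*(s(k+1)+s(k)).
import Mathlib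
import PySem

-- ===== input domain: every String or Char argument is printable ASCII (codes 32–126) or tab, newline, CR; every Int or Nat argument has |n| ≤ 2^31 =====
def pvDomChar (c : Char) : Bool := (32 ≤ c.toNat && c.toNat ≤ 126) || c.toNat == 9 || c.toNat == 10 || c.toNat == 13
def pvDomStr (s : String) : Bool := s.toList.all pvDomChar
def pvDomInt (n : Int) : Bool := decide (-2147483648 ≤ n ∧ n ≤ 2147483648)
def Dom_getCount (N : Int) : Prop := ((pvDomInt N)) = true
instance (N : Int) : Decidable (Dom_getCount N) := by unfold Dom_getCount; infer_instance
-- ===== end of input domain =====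

-- B replaces A's linear dynamic-programming loop by 2x2 matrix exponentiation of the
-- row-sum recurrence s(k+2) = 3*(s(k+1)+s(k)) (objective: faster).

def pyMOD : Int := 10 ^ 9 + 7

-- ===== PORT A =====
-- loop body of A; the list always has length 4, so previous[1..3] never raise
def getCountStep (previous : List Int) : List Int :=
  let c0 := (PySem.List.pyGetD previous 1 0 + PySem.List.pyGetD previous 2 0 +
             PySem.List.pyGetD previous 3 0) % pyMOD
  let c1 := previous.sum % pyMOD
  let c2 := previous.sum % pyMOD
  let c3 := previous.sum % pyMOD
  [c0, c1, c2, c3]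

def getCount (N : Int) : Int :=
  if N = 1 then 4
  else
    ((PySem.List.pyRange 1 N 1).foldl (fun previous _ => getCountStep previous)
      [1, 1, 1, 1]).sum % pyMOD

-- ===== PORT B =====
def matMul (X Y : (Int × Int) × (Int × Int)) : (Int × Int) × (Int × Int) :=
  (((X.1.1 * Y.1.1 + X.1.2 * Y.2.1) % pyMOD, (X.1.1 * Y.1.2 + X.1.2 * Y.2.2) % pyMOD),
   ((X.2.1 * Y.1.1 + X.2.2 * Y.2.1) % pyMOD, (X.2.1 * Y.1.2 + X.2.2 * Y.2.2) % pyMOD))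

-- the while-loop of _mat_pow; its counter e is nonnegative, so it is a Nat here
def matPowAux (R M : (Int × Int) × (Int × Int)) (e : Nat) : (Int × Int) × (Int × Int) :=
  if e = 0 then R
  else matPowAux (if e % 2 = 1 then matMul R M else R) (matMul M M) (e / 2)
termination_by e
decreasing_by exact Nat.div_lt_self (by omega) (by omega)

def getCount_alt (N : Int) : Int :=
  if N ≤ 1 then 4
  else
    ((matPowAux ((1, 0), (0, 1)) ((3, 3), (1, 0)) (N - 2).toNat).1.1 * 15 +
     (matPowAux ((1, 0), (0, 1)) ((3, 3), (1, 0)) (N - 2).toNat).1.2 * 4) % pyMOD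

-- ===== PRECONDITION & SPEC =====
def Spec_getCount (N : Int) (out : Int) : Prop := out = getCount_alt N
instance (N : Int) (out : Int) : Decidable (Spec_getCount N out) := by unfold Spec_getCount; infer_instance

-- ===== CLAIM (what is proved, stated in full; the proofs are below) =====
def Claim_equal_getCount : Prop := ∀ (N : Int), Dom_getCount N → Spec_getCount N (getCount N)

-- ===== LEMMAS AND PROOFS =====

theorem pyMOD_eq : pyMOD = ((1000000007 : Nat) : Int) := by unfold pyMOD; norm_num

-- working copies in ZMod 1000000007
def zMul (X Y : ((ZMod 1000000007) × (ZMod 1000000007)) × ((ZMod 1000000007) × (ZMod 1000000007))) :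
    ((ZMod 1000000007) × (ZMod 1000000007)) × ((ZMod 1000000007) × (ZMod 1000000007)) :=
  ((X.1.1 * Y.1.1 + X.1.2 * Y.2.1, X.1.1 * Y.1.2 + X.1.2 * Y.2.2),
   (X.2.1 * Y.1.1 + X.2.2 * Y.2.1, X.2.1 * Y.1.2 + X.2.2 * Y.2.2))

def zPow (M : ((ZMod 1000000007) × (ZMod 1000000007)) × ((ZMod 1000000007) × (ZMod 1000000007))) :
    Nat → ((ZMod 1000000007) × (ZMod 1000000007)) × ((ZMod 1000000007) × (ZMod 1000000007))
  | 0 => ((1, 0), (0, 1))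
  | k + 1 => zMul M (zPow M k)

def zCast (X : (Int × Int) × (Int × Int)) :
    ((ZMod 1000000007) × (ZMod 1000000007)) × ((ZMod 1000000007) × (ZMod 1000000007)) :=
  (((X.1.1 : ZMod 1000000007), (X.1.2 : ZMod 1000000007)),
   ((X.2.1 : ZMod 1000000007), (X.2.2 : ZMod 1000000007)))

@[simp] theorem cast_mod (a : Int) : ((a % pyMOD : Int) : ZMod 1000000007) = (a : ZMod 1000000007) := by
  have h0 : ((pyMOD : Int) : ZMod 1000000007) = 0 := by
    rw [pyMOD_eq, Int.cast_natCast, ZMod.natCast_self]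
  rw [Int.emod_def]
  push_cast
  rw [h0]; ring

theorem zMul_assoc (X Y Z) : zMul (zMul X Y) Z = zMul X (zMul Y Z) := by
  simp only [zMul, Prod.ext_iff]
  refine ⟨⟨by ring, by ring⟩, by ring, by ring⟩

theorem zMul_one (X) : zMul X ((1, 0), (0, 1)) = X := by
  simp [zMul]

theorem one_zMul (X) : zMul ((1, 0), (0, 1)) X = X := by
  simp [zMul]

theorem zCast_matMul (X Y) : zCast (matMul X Y) = zMul (zCast X) (zCast Y) := by
  simp [matMul, zMul, zCast]

theorem zPow_add (M) (a b : Nat) : zPow M (a + b) = zMul (zPow M a) (zPow M b) := by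
  induction a with
  | zero => simp [zPow, one_zMul]
  | succ a ih =>
      have h : a + 1 + b = (a + b) + 1 := by omega
      rw [h, zPow, zPow, ih, zMul_assoc]

theorem zPow_sq (M) (k : Nat) : zPow (zMul M M) k = zPow M (2 * k) := by
  induction k with
  | zero => rfl
  | succ k ih =>
      have h2 : 2 * (k + 1) = 2 + 2 * k := by omega
      rw [zPow, ih, h2, zPow_add]
      simp [zPow, zMul_one]

theorem matPowAux_cast : ∀ (e : Nat) (R M), zCast (matPowAux R M e) = zMul (zCast R) (zPow (zCast M) e) := by
  intro e
  induction e using Nat.strong_induction_on with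
  | _ e IH =>
    intro R M
    rw [matPowAux]
    by_cases h0 : e = 0
    · simp [h0, zPow, zMul_one]
    · simp only [h0, if_false]
      rw [IH (e / 2) (Nat.div_lt_self (by omega) (by omega))]
      rw [zCast_matMul, zPow_sq]
      by_cases hp : e % 2 = 1
      · simp only [hp, if_true]
        rw [zCast_matMul]
        have he : e = 1 + 2 * (e / 2) := by omega
        conv_rhs => rw [he, zPow_add]
        rw [zMul_assoc]
        congr 1
        simp [zPow, zMul_one]
      · simp only [hp, if_false]
        have he : e = 2 * (e / 2) := by omega
        conv_rhs => rw [he]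

-- the row-sum sequence: σ 0 = 4, σ 1 = 15, σ (k+2) = 3σ(k+1) + 3σ k
def sigma' : Nat → ZMod 1000000007
  | 0 => 4
  | 1 => 15
  | k + 2 => 3 * sigma' (k + 1) + 3 * sigma' k

-- B side: the rows of M₀^k applied to (15, 4) walk σ
theorem zPow_sigma (k : Nat) :
    (zPow (((3, 3), (1, 0)) : _) k).1.1 * 15 + (zPow (((3, 3), (1, 0)) : _) k).1.2 * 4 = sigma' (k + 1) ∧
    (zPow (((3, 3), (1, 0)) : _) k).2.1 * 15 + (zPow (((3, 3), (1, 0)) : _) k).2.2 * 4 = sigma' k := by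
  induction k with
  | zero => constructor <;> simp [zPow, sigma']
  | succ k ih =>
      obtain ⟨h1, h2⟩ := ih
      constructor
      · have hs : sigma' (k + 1 + 1) = 3 * sigma' (k + 1) + 3 * sigma' k := rfl
        rw [hs, ← h1, ← h2]
        simp only [zPow, zMul]
        ring
      · simpa [zPow, zMul] using h1

-- A side, pair form of A's loop body
def gstep (p : Int × Int) : Int × Int := ((3 * p.2) % pyMOD, (p.1 + 3 * p.2) % pyMOD)

def gam (p : (ZMod 1000000007) × (ZMod 1000000007)) : (ZMod 1000000007) × (ZMod 1000000007) :=
  (3 * p.2, p.1 + 3 * p.2)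

theorem foldl_const {α β : Type} (l : List α) (f : β → β) (init : β) :
    l.foldl (fun s _ => f s) init = f^[l.length] init := by
  induction l generalizing init with
  | nil => rfl
  | cons x xs ih => simp [List.foldl, ih, Function.iterate_succ_apply]

theorem getCountStep_pair (u v : Int) :
    getCountStep [u, v, v, v] = [(gstep (u, v)).1, (gstep (u, v)).2, (gstep (u, v)).2, (gstep (u, v)).2] := by
  simp only [getCountStep, gstep, PySem.List.pyGetD, PySem.List.pyGet?, PySem.List.pyIdx?,
    List.sum_cons, List.sum_nil]
  norm_num [show ((1 : Int).toNat) = 1 from rfl, show ((2 : Int).toNat) = 2 from rfl,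
    show ((3 : Int).toNat) = 3 from rfl]
  refine ⟨by congr 1; ring, by congr 1; ring⟩

-- the 4-list state of A's loop keeps shape [u, v, v, v] and follows gstep
theorem iterA (k : Nat) (u v : Int) :
    getCountStep^[k] [u, v, v, v] =
      [(gstep^[k] (u, v)).1, (gstep^[k] (u, v)).2, (gstep^[k] (u, v)).2, (gstep^[k] (u, v)).2] := by
  induction k generalizing u v with
  | zero => rfl
  | succ k ih =>
      rw [Function.iterate_succ_apply, getCountStep_pair, ih,
        Function.iterate_succ_apply]

theorem cast_gstep_iter (k : Nat) (p : Int × Int) :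
    (((gstep^[k] p).1 : ZMod 1000000007), ((gstep^[k] p).2 : ZMod 1000000007)) =
      gam^[k] ((p.1 : ZMod 1000000007), (p.2 : ZMod 1000000007)) := by
  induction k generalizing p with
  | zero => rfl
  | succ k ih =>
      rw [Function.iterate_succ_apply, Function.iterate_succ_apply, ih (gstep p)]
      congr 1
      simp [gstep, gam]

-- the A-side invariant: u + 3v along gam's orbit from (1,1) is σ
theorem gam_sigma (k : Nat) :
    (gam^[k] ((1 : ZMod 1000000007), (1 : ZMod 1000000007))).1 +
      3 * (gam^[k] ((1 : ZMod 1000000007), (1 : ZMod 1000000007))).2 = sigma' k := by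
  induction k using Nat.twoStepInduction with
  | zero => norm_num [sigma']
  | one => norm_num [gam, sigma']
  | more k ih1 ih2 =>
      rw [Function.iterate_succ_apply', Function.iterate_succ_apply']
      rw [Function.iterate_succ_apply'] at ih2
      have hs : sigma' (k + 2) = 3 * sigma' (k + 1) + 3 * sigma' k := rfl
      rw [hs, ← ih1, ← ih2]
      simp only [gam]
      ring

theorem int_eq_of_zmod_mod (x y : Int)
    (h : ((x : ZMod 1000000007) = (y : ZMod 1000000007))) : x % pyMOD = y % pyMOD := by
  have hm := (ZMod.intCast_eq_intCast_iff' x y 1000000007).mp h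
  rw [pyMOD_eq]
  exact hm

theorem getCount_eq_alt (N : Int) : getCount N = getCount_alt N := by
  by_cases hle : N ≤ 1
  · -- small N: the range is empty, both sides are 4
    unfold getCount getCount_alt
    by_cases h1 : N = 1
    · simp [h1]
    · rw [PySem.List.pyRange_one_eq_nil (by omega)]
      simp [h1, hle, pyMOD]
  · -- N ≥ 2
    unfold getCount getCount_alt
    rw [if_neg (by omega : ¬ N = 1), if_neg hle]
    rw [foldl_const, PySem.List.length_pyRange_one, iterA]
    apply int_eq_of_zmod_mod
    have hk : (N - 1).toNat = (N - 2).toNat + 1 := by omega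
    rw [hk]
    -- A side
    have hc := cast_gstep_iter ((N - 2).toNat + 1) ((1 : Int), (1 : Int))
    have hA1 := congrArg Prod.fst hc
    have hA2 := congrArg Prod.snd hc
    simp only [Int.cast_one] at hA1 hA2
    have hg := gam_sigma ((N - 2).toNat + 1)
    -- B side
    have hm := matPowAux_cast (N - 2).toNat ((1, 0), (0, 1)) ((3, 3), (1, 0))
    have hid : zCast (((1, 0), (0, 1)) : (Int × Int) × (Int × Int)) = (((1, 0), (0, 1)) : _) := by
      simp [zCast]
    rw [hid, one_zMul] at hm
    have h11 := congrArg (fun X => X.1.1) hm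
    have h12 := congrArg (fun X => X.1.2) hm
    simp only [zCast] at h11 h12
    push_cast at h11 h12
    have hz := (zPow_sigma ((N - 2).toNat)).1
    simp only [List.sum_cons, List.sum_nil]
    push_cast
    rw [hA1, hA2, h11, h12]
    linear_combination hg - hz

-- ===== VERDICT (by name: the statement is the Claim_ definition above) =====
theorem getCount_spec : Claim_equal_getCount := by
  intro N _
  unfold Spec_getCount
  exact getCount_eq_alt N
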